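-- pv_equiv track=rewrite | github.com/Arsen1302/Code-copy-detector | TestData/solutions/problem_1603_4.py | solution_1603_4
-- ===== SOURCE A (Python) =====
-- def solution_1603_4(n: int) -> int:
--     dpArray = [0]*(n + 1)
--     dpArray[0] = 1
--     dpArray[1] = 2
--
--     mod = 10**9 + 7
--
--     for i in range(2, n + 1):
--         dpArray[i] = dpArray[i - 1] + dpArray[i - 2]
--         dpArray[i] = dpArray[i] % mod
--
--     return (dpArray[n]**2) % mod
-- ===== SOURCE B (Python) =====
-- def solution_1603_4(n: int) -> int:
--     mod = 10**9 + 7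
--
--     def fib_pair(k: int) -> tuple:
--         # returns (F(k) % mod, F(k+1) % mod) by fast doubling
--         if k == 0:
--             return (0, 1)
--         a, b = fib_pair(k >> 1)
--         c = a * (2 * b - a) % mod
--         d = (a * a + b * b) % mod
--         if k & 1:
--             return (d, (c + d) % mod)
--         return (c, d)
--
--     f = fib_pair(n + 2)[0]
--     return f * f % mod
-- ===== Notes on version B (the rewrite author's own statement) =====
-- stated objective: faster
-- what changed: Replaced the O(n) dp-array loop for the Fibonacci-like recurrence by recursive fast doubling (F(2k), F(2k+1) identities) mod 1e9+7, then squares the result.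
import Mathlib
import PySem

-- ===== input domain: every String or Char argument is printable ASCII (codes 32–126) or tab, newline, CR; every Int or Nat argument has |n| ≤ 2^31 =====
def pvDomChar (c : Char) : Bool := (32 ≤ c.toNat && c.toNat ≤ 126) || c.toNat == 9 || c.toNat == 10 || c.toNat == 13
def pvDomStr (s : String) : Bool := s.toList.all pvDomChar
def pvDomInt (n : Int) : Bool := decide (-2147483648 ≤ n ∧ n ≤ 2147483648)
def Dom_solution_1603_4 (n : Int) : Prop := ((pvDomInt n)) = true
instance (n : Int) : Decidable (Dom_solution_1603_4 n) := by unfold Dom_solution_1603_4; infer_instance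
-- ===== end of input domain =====

-- B replaces A's O(n) dp-array loop by O(log n) fast doubling of the Fibonacci pair mod 1e9+7 (objective: faster).

-- ===== PORT A =====
def solution_1603_4 (n : Int) : Int :=
  let dpArray : List Int := List.replicate (n + 1).toNat 0
  let dpArray := dpArray.set 0 1
  let dpArray := dpArray.set 1 2
  let mod : Int := 10 ^ 9 + 7
  let dpArray := (PySem.List.pyRange 2 (n + 1) 1).foldl
    (fun dp i =>
      let dp := dp.set i.toNat (PySem.List.pyGetD dp (i - 1) 0 + PySem.List.pyGetD dp (i - 2) 0)
      dp.set i.toNat (PySem.Int.mod (PySem.List.pyGetD dp i 0) mod)) dpArray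
  PySem.Int.mod (PySem.List.pyGetD dpArray n 0 ^ 2) mod

-- ===== PORT B =====
-- fib_pair from Source B: returns (F(k) % mod, F(k+1) % mod) by fast doubling.
-- Python's k >> 1 and k & 1 on the Nat argument are k / 2 and k % 2 (exact for k ≥ 0).
def fibPairFD (m : Int) (k : Nat) : Int × Int :=
  if h : k = 0 then (0, 1)
  else
    let ab := fibPairFD m (k / 2)
    let a := ab.1
    let b := ab.2
    let c := PySem.Int.mod (a * (2 * b - a)) m
    let d := PySem.Int.mod (a * a + b * b) m
    if k % 2 = 1 then (d, PySem.Int.mod (c + d) m) else (c, d)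
termination_by k
decreasing_by exact Nat.div_lt_self (Nat.pos_of_ne_zero h) one_lt_two

def solution_1603_4_alt (n : Int) : Int :=
  let mod : Int := 10 ^ 9 + 7
  let f := (fibPairFD mod (n + 2).toNat).1
  PySem.Int.mod (f * f) mod

-- ===== PRECONDITION & SPEC =====
-- For n ≤ 0 the Python A raises IndexError (assigning dpArray[1] on a list of length ≤ 1).
def Pre_solution_1603_4 (n : Int) : Prop := 1 ≤ n
instance (n : Int) : Decidable (Pre_solution_1603_4 n) := by unfold Pre_solution_1603_4; infer_instance
def pvWitness_solution_1603_4 : Int := 5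

def Spec_solution_1603_4 (n : Int) (out : Int) : Prop := out = solution_1603_4_alt n
instance (n : Int) (out : Int) : Decidable (Spec_solution_1603_4 n out) := by unfold Spec_solution_1603_4; infer_instance

-- ===== CLAIM (what is proved, stated in full; the proofs are below) =====
def Claim_equal_solution_1603_4 : Prop := ∀ (n : Int), Dom_solution_1603_4 n → Pre_solution_1603_4 n → Spec_solution_1603_4 n (solution_1603_4 n)

-- ===== LEMMAS AND PROOFS =====

-- the modulus
def pvP : Int := 10 ^ 9 + 7

theorem pvP_pos : (0:Int) < pvP := by unfold pvP; norm_num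

-- B's fast doubling computes the Fibonacci pair mod pvP
theorem fibPairFD_spec : ∀ k : Nat,
    fibPairFD pvP k = ((Nat.fib k : Int) % pvP, (Nat.fib (k + 1) : Int) % pvP) := by
  intro k
  induction k using Nat.strong_induction_on with
  | _ k ih =>
    by_cases h0 : k = 0
    · subst h0
      rw [fibPairFD]
      norm_num [pvP]
    · rw [fibPairFD, dif_neg h0]
      have hm : k / 2 < k := Nat.div_lt_self (Nat.pos_of_ne_zero h0) one_lt_two
      rw [ih _ hm]
      simp only [PySem.Int.mod_eq_emod_of_pos pvP_pos]
      set m := k / 2 with hmdef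
      set Fm : Int := (Nat.fib m : Int) with hFm
      set Fm1 : Int := (Nat.fib (m+1) : Int) with hFm1
      have ha : Fm % pvP ≡ Fm [ZMOD pvP] := Int.emod_emod_of_dvd _ dvd_rfl
      have hb : Fm1 % pvP ≡ Fm1 [ZMOD pvP] := Int.emod_emod_of_dvd _ dvd_rfl
      have hle : Nat.fib m ≤ 2 * Nat.fib (m+1) := by
        have h1 := Nat.fib_mono (Nat.le_succ m)
        simp only [Nat.succ_eq_add_one] at h1
        omega
      have hfib2m : ((Nat.fib (2*m) : Int)) = Fm * (2*Fm1 - Fm) := by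
        rw [Nat.fib_two_mul]; push_cast [hle]; ring
      have hfib2m1 : ((Nat.fib (2*m+1) : Int)) = Fm * Fm + Fm1 * Fm1 := by
        rw [Nat.fib_two_mul_add_one]; push_cast; ring
      have hc : Fm % pvP * (2 * (Fm1 % pvP) - Fm % pvP) ≡ (Nat.fib (2*m) : Int) [ZMOD pvP] := by
        rw [hfib2m]; exact ha.mul ((hb.mul_left 2).sub ha)
      have hd : Fm % pvP * (Fm % pvP) + Fm1 % pvP * (Fm1 % pvP) ≡ (Nat.fib (2*m+1) : Int) [ZMOD pvP] := by
        rw [hfib2m1]; exact (ha.mul ha).add (hb.mul hb)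
      rcases Nat.mod_two_eq_zero_or_one k with hr | hr
      · have hk : k = 2 * m := by omega
        rw [if_neg (by omega), hk, Prod.mk.injEq]
        exact ⟨hc, hd⟩
      · have hk : k = 2 * m + 1 := by omega
        rw [if_pos hr]
        have hcm : Fm % pvP * (2 * (Fm1 % pvP) - Fm % pvP) % pvP ≡ (Nat.fib (2*m) : Int) [ZMOD pvP] :=
          (Int.emod_emod_of_dvd _ dvd_rfl).trans hc
        have hdm : (Fm % pvP * (Fm % pvP) + Fm1 % pvP * (Fm1 % pvP)) % pvP ≡ (Nat.fib (2*m+1) : Int) [ZMOD pvP] :=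
          (Int.emod_emod_of_dvd _ dvd_rfl).trans hd
        have hsum : ((Nat.fib (2*m+2) : Int)) = (Nat.fib (2*m) : Int) + (Nat.fib (2*m+1) : Int) := by
          rw [Nat.fib_add_two]; push_cast; ring
        rw [hk, Prod.mk.injEq]
        refine ⟨hd, ?_⟩
        have h2 : 2*m+1+1 = 2*m+2 := by omega
        rw [h2, hsum]
        exact hcm.add hdm

-- A's dp sequence: dpArray[j] after the loop has passed j
def gseq : Nat → Int
  | 0 => 1
  | 1 => 2
  | (j + 2) => PySem.Int.mod (gseq (j + 1) + gseq j) pvP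

theorem gseq_eq_fib : ∀ j : Nat, gseq j = (Nat.fib (j + 2) : Int) % pvP := by
  intro j
  induction j using Nat.twoStepInduction with
  | zero =>
    show (1:Int) = (Nat.fib 2 : Int) % pvP
    norm_num [pvP, Nat.fib]
  | one =>
    show (2:Int) = (Nat.fib 3 : Int) % pvP
    have : Nat.fib 3 = 2 := by decide
    rw [this]; norm_num [pvP]
  | more j ih1 ih2 =>
    show PySem.Int.mod (gseq (j+1) + gseq j) pvP = (Nat.fib (j+2+2) : Int) % pvP
    rw [PySem.Int.mod_eq_emod_of_pos pvP_pos, ih1, ih2]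
    have hsum : ((Nat.fib (j+2+2) : Int)) = (Nat.fib (j+1+2) : Int) + (Nat.fib (j+2) : Int) := by
      have h := Nat.fib_add_two (n := j+2)
      have h2 : j+1+2 = j+2+1 := by omega
      rw [h2]; push_cast [h]; ring
    rw [hsum]
    have e1 : (Nat.fib (j+1+2) : Int) % pvP ≡ (Nat.fib (j+1+2) : Int) [ZMOD pvP] :=
      Int.emod_emod_of_dvd _ dvd_rfl
    have e2 : (Nat.fib (j+2) : Int) % pvP ≡ (Nat.fib (j+2) : Int) [ZMOD pvP] :=
      Int.emod_emod_of_dvd _ dvd_rfl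
    exact e1.add e2

-- model of the dp list after the loop has processed range(2, m)
def pvSt (N m : Nat) : List Int :=
  (List.range N).map (fun j => if j < m then gseq j else 0)

theorem pvSt_get (N m j : Nat) (hj : j < N) (hjm : j < m) :
    PySem.List.pyGetD (pvSt N m) (j : Int) 0 = gseq j := by
  rw [PySem.List.pyGetD_natCast]
  unfold pvSt
  rw [PySem.List.getD_map_range _ _ _ _ hj, if_pos hjm]

theorem pvSt_length (N m : Nat) : (pvSt N m).length = N := by
  unfold pvSt; simp

theorem pvSt_init (N : Nat) (_h : 2 ≤ N) :
    ((List.replicate N (0:Int)).set 0 1).set 1 2 = pvSt N 2 := by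
  apply List.ext_getElem
  · simp [pvSt]
  · intro i h1 h2
    simp only [List.getElem_set, List.getElem_replicate, pvSt, List.getElem_map,
      List.getElem_range]
    match i with
    | 0 => simp [gseq]
    | 1 => simp [gseq]
    | (i+2) => simp

theorem pvSt_set (N m : Nat) (_hm : m < N) :
    (pvSt N m).set m (gseq m) = pvSt N (m+1) := by
  apply List.ext_getElem
  · simp [pvSt]
  · intro i h1 h2
    simp only [List.getElem_set, pvSt, List.getElem_map, List.getElem_range]
    by_cases him : m = i
    · subst him; simp
    · rw [if_neg him]
      by_cases hi : i < m
      · rw [if_pos hi, if_pos (by omega)]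
      · rw [if_neg hi, if_neg (by omega)]

theorem pvLoop_inv (N : Nat) (_hN : 2 ≤ N) : ∀ (m : Nat) (hm2 : 2 ≤ m), m ≤ N →
    (PySem.List.pyRange 2 (m : Int) 1).foldl
      (fun dp i =>
        let dp := dp.set i.toNat (PySem.List.pyGetD dp (i - 1) 0 + PySem.List.pyGetD dp (i - 2) 0)
        dp.set i.toNat (PySem.Int.mod (PySem.List.pyGetD dp i 0) pvP)) (pvSt N 2)
    = pvSt N m := by
  intro m hm2
  induction m, hm2 using Nat.le_induction with
  | base =>
    intro _
    simp
  | succ m _hm2 ih =>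
    intro hmN
    have hcast : ((m + 1 : Nat) : Int) = (m : Int) + 1 := by push_cast; ring
    rw [hcast, PySem.List.pyRange_one_succ_right (by push_cast; omega), List.foldl_append,
      ih (by omega)]
    simp only [List.foldl_cons, List.foldl_nil]
    obtain ⟨j, rfl⟩ : ∃ j, m = j + 2 := ⟨m - 2, by omega⟩
    have hc1 : ((j + 2 : Nat) : Int) - 1 = ((j + 1 : Nat) : Int) := by push_cast; ring
    have hc2 : ((j + 2 : Nat) : Int) - 2 = ((j : Nat) : Int) := by push_cast; ring
    rw [hc1, hc2, pvSt_get N (j+2) (j+1) (by omega) (by omega),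
      pvSt_get N (j+2) j (by omega) (by omega)]
    rw [Int.toNat_natCast]
    have hmid : PySem.List.pyGetD
        ((pvSt N (j+2)).set (j+2) (gseq (j+1) + gseq j)) ((j+2 : Nat) : Int) 0
        = gseq (j+1) + gseq j := by
      rw [PySem.List.pyGetD_natCast]
      have hlen : j + 2 < ((pvSt N (j+2)).set (j+2) (gseq (j+1) + gseq j)).length := by
        rw [List.length_set, pvSt_length]; omega
      rw [List.getD_eq_getElem _ _ hlen, List.getElem_set, if_pos rfl]
    rw [hmid, List.set_set]
    have hg : PySem.Int.mod (gseq (j+1) + gseq j) pvP = gseq (j+2) := rfl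
    rw [hg]
    exact pvSt_set N (j+2) (by omega)

-- ===== VERDICT (by name: the statement is the Claim_ definition above) =====
theorem solution_1603_4_spec : Claim_equal_solution_1603_4 := by
  intro n _ hpre
  unfold Pre_solution_1603_4 at hpre
  unfold Spec_solution_1603_4 solution_1603_4 solution_1603_4_alt
  dsimp only
  set N : Nat := (n + 1).toNat with hNdef
  have hN2 : 2 ≤ N := by omega
  have hNint : n + 1 = (N : Int) := by omega
  have hmod : (10 ^ 9 + 7 : Int) = pvP := rfl
  rw [hmod, hNint, pvSt_init N hN2, pvLoop_inv N hN2 N hN2 (le_refl N)]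
  have hn : n = ((N - 1 : Nat) : Int) := by omega
  rw [hn, pvSt_get N N (N-1) (by omega) (by omega), gseq_eq_fib]
  have hk : ((N - 1 : Nat) : Int) + 2 = ((N - 1 + 2 : Nat) : Int) := by push_cast; ring
  rw [hk, Int.toNat_natCast, fibPairFD_spec (N - 1 + 2)]
  dsimp only
  rw [pow_two]
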